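-- pv_equiv track=rewrite | github.com/tsizzle131/apollo-lead-generation | modules/web_scraper.py | _prioritize_links
-- ===== SOURCE A (Python) =====
-- from typing import List, Dict, Any, Optional
--
-- HIGH_VALUE_PAGES = [
--     '/about', '/about-us', '/aboutus', '/about_us',
--     '/team', '/our-team', '/ourteam', '/staff', '/leadership', '/people',
--     '/contact', '/contact-us', '/contactus', '/contact_us',
--     '/services', '/what-we-do', '/our-services',
-- ]
--
-- def _prioritize_links(links: List[str]) -> List[str]:
--     """Prioritize high-value pages (about, team, contact) at the front"""
--     high_value = []
--     regular = []
--
--     for link in links: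
--         link_lower = link.lower()
--         if any(hv in link_lower for hv in HIGH_VALUE_PAGES):
--             high_value.append(link)
--         else:
--             regular.append(link)
--
--     # Return high-value pages first, then regular pages
--     return high_value + regular
-- ===== SOURCE B (Python) =====
-- from typing import List
--
-- HIGH_VALUE_PAGES = [
--     '/about', '/about-us', '/aboutus', '/about_us',
--     '/team', '/our-team', '/ourteam', '/staff', '/leadership', '/people',
--     '/contact', '/contact-us', '/contactus', '/contact_us',
--     '/services', '/what-we-do', '/our-services',
-- ]
--
-- def _prioritize_links(links: List[str]) -> List[str]:
--     """Prioritize high-value pages (about, team, contact) at the front"""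
--     # Stable sort on the boolean key: high-value links (key False) come first,
--     # each group keeping its original relative order.
--     return sorted(links, key=lambda l: not any(hv in l.lower() for hv in HIGH_VALUE_PAGES))
-- ===== Notes on version B (the rewrite author's own statement) =====
-- stated objective: idiomatic
-- what changed: Replaced the explicit two-bucket partition loop with a single stable sort keyed on the high-value predicate; sort stability preserves each group's original order.
import Mathlib
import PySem

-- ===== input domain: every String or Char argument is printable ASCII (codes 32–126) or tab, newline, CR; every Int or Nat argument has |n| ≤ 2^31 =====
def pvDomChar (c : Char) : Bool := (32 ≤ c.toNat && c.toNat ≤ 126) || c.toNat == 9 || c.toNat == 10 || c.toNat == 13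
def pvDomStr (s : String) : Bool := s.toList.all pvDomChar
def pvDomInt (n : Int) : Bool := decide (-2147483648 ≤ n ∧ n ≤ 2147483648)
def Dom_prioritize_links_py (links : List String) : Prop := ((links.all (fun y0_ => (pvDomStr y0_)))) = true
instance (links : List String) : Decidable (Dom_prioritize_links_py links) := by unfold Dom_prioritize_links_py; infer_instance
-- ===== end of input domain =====

-- B replaces A's explicit two-bucket partition with a single stable sort keyed on the
-- high-value predicate (idiomatic; same result, not faster).

-- ===== PORT A =====
def HIGH_VALUE_PAGES : List String :=
  ["/about", "/about-us", "/aboutus", "/about_us",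
   "/team", "/our-team", "/ourteam", "/staff", "/leadership", "/people",
   "/contact", "/contact-us", "/contactus", "/contact_us",
   "/services", "/what-we-do", "/our-services"]

-- A: one pass appending each link to the high_value or regular bucket, then concatenate.
def prioritize_links_py (links : List String) : List String :=
  let p := links.foldl
    (fun (acc : List String × List String) link =>
      let link_lower := PySem.Str.lower link
      if HIGH_VALUE_PAGES.any (fun hv => PySem.Str.isIn hv link_lower) then
        (acc.1 ++ [link], acc.2)
      else
        (acc.1, acc.2 ++ [link]))
    ([], [])
  p.1 ++ p.2

-- ===== PORT B =====
-- B: a single stable sort keyed on "is NOT a high-value link" (False sorts first).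
def prioritize_links_py_alt (links : List String) : List String :=
  PySem.List.sorted links
    (fun l => !(HIGH_VALUE_PAGES.any (fun hv => PySem.Str.isIn hv (PySem.Str.lower l))))
    false

-- ===== PRECONDITION & SPEC =====
def Spec_prioritize_links_py (links : List String) (out : List String) : Prop := out = prioritize_links_py_alt links
instance (links : List String) (out : List String) : Decidable (Spec_prioritize_links_py links out) := by unfold Spec_prioritize_links_py; infer_instance

-- ===== CLAIM (what is proved, stated in full; the proofs are below) =====
def Claim_equal_prioritize_links_py : Prop := ∀ (links : List String), Dom_prioritize_links_py links → Spec_prioritize_links_py links (prioritize_links_py links)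

-- ===== LEMMAS AND PROOFS =====

-- the shared high-value predicate, used only by the proofs below
def pvHV (l : String) : Bool :=
  HIGH_VALUE_PAGES.any (fun hv => PySem.Str.isIn hv (PySem.Str.lower l))

lemma insertBy_all_false {α : Type} (before : α → α → Bool) (x : α) (l : List α)
    (h : ∀ y ∈ l, before x y = false) :
    PySem.List.insertBy before x l = l ++ [x] := by
  induction l with
  | nil => rfl
  | cons y ys ih =>
      simp [PySem.List.insertBy, h y (by simp)]
      exact ih (fun z hz => h z (by simp [hz]))

-- inserting into F ++ T (F all-hv, T all-non-hv) under the Bool key (!pvHV ·)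
lemma insertBy_partition (x : String) (F T : List String)
    (hF : ∀ y ∈ F, pvHV y = true) (hT : ∀ y ∈ T, pvHV y = false) :
    PySem.List.insertBy (fun a b => decide ((!pvHV a) < (!pvHV b))) x (F ++ T)
      = if pvHV x then F ++ x :: T else F ++ T ++ [x] := by
  induction F with
  | nil =>
      simp only [List.nil_append]
      by_cases hx : pvHV x
      · cases T with
        | nil => simp [PySem.List.insertBy, hx]
        | cons t ts =>
            have ht : pvHV t = false := hT t (by simp)
            simp [PySem.List.insertBy, hx, ht]
      · have hx' : pvHV x = false := by simpa using hx
        rw [insertBy_all_false]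
        · simp [hx']
        · intro y hy
          have hy' : pvHV y = false := hT y hy
          simp [hx', hy']
  | cons f fs ih =>
      have hf : pvHV f = true := hF f (by simp)
      have step : PySem.List.insertBy (fun a b => decide ((!pvHV a) < (!pvHV b))) x (f :: (fs ++ T))
          = f :: PySem.List.insertBy (fun a b => decide ((!pvHV a) < (!pvHV b))) x (fs ++ T) := by
        simp [PySem.List.insertBy, hf]
      have ih' := ih (fun y hy => hF y (by simp [hy]))
      by_cases hx : pvHV x
      · simp only [List.cons_append, step, ih', if_pos hx]
      · simp only [List.cons_append, step, ih', if_neg hx]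

lemma sorted_eq_partition (links : List String) :
    PySem.List.sorted links (fun l => !pvHV l) false
      = links.filter (fun l => pvHV l) ++ links.filter (fun l => !pvHV l) := by
  induction links using List.reverseRecOn with
  | nil => rfl
  | append_singleton xs x ih =>
      have : PySem.List.sorted (xs ++ [x]) (fun l => !pvHV l) false
          = PySem.List.insertBy (fun a b => decide ((!pvHV a) < (!pvHV b))) x
              (PySem.List.sorted xs (fun l => !pvHV l) false) := by
        simp [PySem.List.sorted]
      rw [this, ih, insertBy_partition x _ _
        (fun y hy => by simpa using (List.of_mem_filter hy))
        (fun y hy => by simpa using (List.of_mem_filter hy))]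
      by_cases hx : pvHV x <;> simp [List.filter_append, hx]

lemma foldl_buckets (links : List String) (h r : List String) :
    links.foldl
      (fun (acc : List String × List String) link =>
        let link_lower := PySem.Str.lower link
        if HIGH_VALUE_PAGES.any (fun hv => PySem.Str.isIn hv link_lower) then
          (acc.1 ++ [link], acc.2)
        else
          (acc.1, acc.2 ++ [link])) (h, r)
      = (h ++ links.filter (fun l => pvHV l), r ++ links.filter (fun l => !pvHV l)) := by
  induction links generalizing h r with
  | nil => simp
  | cons x xs ih =>
      by_cases hx : pvHV x
      · simp only [List.foldl_cons]
        rw [if_pos (by simpa [pvHV] using hx)]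
        rw [ih]
        simp [hx]
      · simp only [List.foldl_cons]
        rw [if_neg (by simpa [pvHV] using hx)]
        rw [ih]
        simp [hx]

-- ===== VERDICT (by name: the statement is the Claim_ definition above) =====
theorem prioritize_links_py_spec : Claim_equal_prioritize_links_py := by
  intro links _
  unfold Spec_prioritize_links_py prioritize_links_py prioritize_links_py_alt
  have hb : (fun l => !(HIGH_VALUE_PAGES.any (fun hv => PySem.Str.isIn hv (PySem.Str.lower l))))
      = (fun l => !pvHV l) := by funext l; simp [pvHV]
  rw [hb, sorted_eq_partition, foldl_buckets]
  simp
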